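-- pv_equiv track=rewrite | github.com/lMoonHawk/AoC-py | 2019/day_11.py | get_repr_panels
-- ===== SOURCE A (Python) =====
-- def get_repr_panels(panels):
--     xs = [x for x, _ in panels]
--     ys = [y for _, y in panels]
--
--     panels_str = "\n"
--     for y in range(max(ys), min(ys) - 1, -1):
--         for x in range(min(xs), max(xs) + 1):
--             color = 0
--             if (x, y) in panels:
--                 color = panels[(x, y)]
--             panels_str += "##" if color == 1 else "  "
--         panels_str += "\n"
--     return panels_str[:-1]
-- ===== SOURCE B (Python) =====
-- def get_repr_panels(panels):
--     xs = [x for x, _ in panels]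
--     ys = [y for _, y in panels]
--     min_x, max_x = min(xs), max(xs)
--     min_y, max_y = min(ys), max(ys)
--     lit = {}
--     for (x, y), c in panels.items():
--         if c == 1:
--             lit.setdefault(y, []).append(x)
--     lines = []
--     for y in range(max_y, min_y - 1, -1):
--         parts = []
--         prev = min_x
--         for x in sorted(lit.get(y, [])):
--             parts.append("  " * (x - prev))
--             parts.append("##")
--             prev = x + 1
--         parts.append("  " * (max_x + 1 - prev))
--         lines.append("".join(parts))
--     return "\n" + "\n".join(lines)
-- ===== Notes on version B (the rewrite author's own statement) =====
-- stated objective: alternative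
-- what changed: A scans every cell of the bounding box and looks each (x, y) up in the panels dict; B groups the lit (color==1) x's by row once, sorts each row's group, and renders each line sparsely as ' '-runs between the '##' cells, never consulting the dict per cell.
-- outside the precondition, e.g. on get_repr_panels({}): A raises ValueError, B raises ValueError
import Mathlib
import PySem

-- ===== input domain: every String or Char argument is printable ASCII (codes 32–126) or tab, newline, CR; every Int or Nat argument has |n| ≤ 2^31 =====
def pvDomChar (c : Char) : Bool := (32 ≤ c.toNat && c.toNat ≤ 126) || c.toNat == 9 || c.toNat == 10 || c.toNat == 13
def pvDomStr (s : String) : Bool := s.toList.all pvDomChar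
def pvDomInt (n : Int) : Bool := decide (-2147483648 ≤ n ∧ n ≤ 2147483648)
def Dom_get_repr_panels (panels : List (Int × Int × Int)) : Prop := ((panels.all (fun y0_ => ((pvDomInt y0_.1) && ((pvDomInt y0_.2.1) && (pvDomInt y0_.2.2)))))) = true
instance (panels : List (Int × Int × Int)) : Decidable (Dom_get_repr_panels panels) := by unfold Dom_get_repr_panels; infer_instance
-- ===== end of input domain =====

-- B replaces A's per-cell lookup over the whole bounding box by a sparse rendering: it groups the
-- lit (color==1) panel x's by row, sorts each group, and emits each row as blank runs between the
-- lit cells (objective: alternative).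


-- ===== PORT A =====
-- Literal port of A: for y from max(ys) down to min(ys), for x from min(xs) to max(xs),
-- look the key (x, y) up in the association list (first match = dict lookup), append "##"/"  ",
-- a newline after each row, finally drop the last character with s[:-1].
def get_repr_panels (panels : List (Int × Int × Int)) : String :=
  let xs := panels.map (fun e => e.1)
  let ys := panels.map (fun e => e.2.1)
  match PySem.List.max? ys (fun v => v), PySem.List.min? ys (fun v => v),
        PySem.List.min? xs (fun v => v), PySem.List.max? xs (fun v => v) with
  | some maxy, some miny, some minx, some maxx =>
      let s : String :=
        (PySem.List.pyRange maxy (miny - 1) (-1)).foldl (fun s y =>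
          ((PySem.List.pyRange minx (maxx + 1) 1).foldl (fun s x =>
              let color : Int :=
                match panels.find? (fun e => e.1 == x && e.2.1 == y) with
                | some e => e.2.2
                | none => 0
              s ++ (if color == 1 then "##" else "  ")) s) ++ "\n") "\n"
      PySem.Str.slice s none (some (-1))
  | _, _, _, _ => ""  -- unreachable under Pre_ (Python raises ValueError on empty panels)

-- ===== PORT B =====
-- Literal port of B: group the x's of the lit (c == 1) panels by row y (the 'lit' dict;
-- setdefault(y, []).append(x) is Dict.modify y [] (· ++ [x])), then for each y from max to min
-- emit the sorted lit x's of that row as '  '-runs between '##' cells ('  ' * n is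
-- PySem.List.pyRepeat [' ',' '] n, exact also for n ≤ 0), and join the lines.
def pvLit (panels : List (Int × Int × Int)) : PySem.Dict Int (List Int) :=
  panels.foldl
    (fun d e => if e.2.2 == 1 then d.modify e.2.1 [] (fun l => l ++ [e.1]) else d)
    PySem.Dict.empty

def pvRowChars (minx maxx : Int) (sx : List Int) : List Char :=
  let st := sx.foldl
    (fun (p : List Char × Int) x =>
      (p.1 ++ PySem.List.pyRepeat [' ', ' '] (x - p.2) ++ ['#', '#'], x + 1))
    ([], minx)
  st.1 ++ PySem.List.pyRepeat [' ', ' '] (maxx + 1 - st.2)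

def get_repr_panels_alt (panels : List (Int × Int × Int)) : String :=
  let xs := panels.map (fun e => e.1)
  let ys := panels.map (fun e => e.2.1)
  match PySem.List.min? xs (fun v => v) with
  | none => ""  -- unreachable under Pre_ (min of empty raises ValueError in B too)
  | some minx =>
  match PySem.List.max? xs (fun v => v) with
  | none => ""
  | some maxx =>
  match PySem.List.min? ys (fun v => v) with
  | none => ""
  | some miny =>
  match PySem.List.max? ys (fun v => v) with
  | none => ""
  | some maxy =>
      let lit := pvLit panels
      let lines := (PySem.List.pyRange maxy (miny - 1) (-1)).map (fun y =>
        String.ofList (pvRowChars minx maxx (PySem.List.sorted (lit.getD y []) (fun v => v))))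
      "\n" ++ PySem.Str.join "\n" lines

-- ===== PRECONDITION & SPEC =====
-- Pre_ excludes the empty list (Python A raises ValueError on max([])) and lists with a
-- duplicate (x, y) key, which have no Python-dict preimage (a dict's items are key-distinct,
-- so which duplicate wins would be an accident of the association-list representation).
def Pre_get_repr_panels (panels : List (Int × Int × Int)) : Prop :=
  panels ≠ [] ∧ (panels.map (fun e => (e.1, e.2.1))).Nodup
instance (panels : List (Int × Int × Int)) : Decidable (Pre_get_repr_panels panels) := by
  unfold Pre_get_repr_panels; infer_instance

def pvWitness_get_repr_panels : (List (Int × Int × Int)) := [(0, 0, 1), (1, 0, 0), (0, 1, 1)]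

def Spec_get_repr_panels (panels : List (Int × Int × Int)) (out : String) : Prop := out = get_repr_panels_alt panels
instance (panels : List (Int × Int × Int)) (out : String) : Decidable (Spec_get_repr_panels panels out) := by unfold Spec_get_repr_panels; infer_instance

-- ===== CLAIM (what is proved, stated in full; the proofs are below) =====
def Claim_equal_get_repr_panels : Prop := ∀ (panels : List (Int × Int × Int)), Dom_get_repr_panels panels → Pre_get_repr_panels panels → Spec_get_repr_panels panels (get_repr_panels panels)

-- ===== LEMMAS AND PROOFS =====
def pvTok (c : Int) : List Char := if c == 1 then ['#', '#'] else [' ', ' ']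

def pvToken (c : Int) : String := if c == 1 then "##" else "  "

def pvCell (panels : List (Int × Int × Int)) (x y : Int) : Int :=
  match panels.find? (fun e => e.1 == x && e.2.1 == y) with
  | some e => e.2.2
  | none => 0

def pvLitList (panels : List (Int × Int × Int)) (y : Int) : List Int :=
  ((panels.filter (fun e => e.2.2 == 1)).filter (fun e => e.2.1 == y)).map (fun e => e.1)

lemma pvToken_toList (c : Int) : (pvToken c).toList = pvTok c := by
  unfold pvToken pvTok; split <;> decide

lemma pvFoldlStr (l : List Int) (f : Int → String) (s0 : String) :
    (l.foldl (fun s x => s ++ f x) s0).toList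
      = s0.toList ++ (l.map (fun x => (f x).toList)).flatten := by
  induction l generalizing s0 with
  | nil => simp
  | cons a t ih => simp [List.foldl_cons, ih, String.toList_append]

lemma pvFoldlRows (ylist xr : List Int) (f : Int → Int → String) (s0 : String) :
    (ylist.foldl (fun s y => (xr.foldl (fun s x => s ++ f x y) s) ++ "\n") s0).toList
      = s0.toList ++ (ylist.map (fun y => (xr.map (fun x => (f x y).toList)).flatten ++ ['\n'])).flatten := by
  induction ylist generalizing s0 with
  | nil => simp
  | cons a t ih =>
    rw [List.foldl_cons, ih, String.toList_append, pvFoldlStr]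
    have hn : ("\n" : String).toList = ['\n'] := rfl
    simp [hn]

lemma pvIntercalate_cons₂ (a b : List Char) (l : List (List Char)) :
    List.intercalate ['\n'] (a :: b :: l) = a ++ ['\n'] ++ List.intercalate ['\n'] (b :: l) := by
  simp [List.intercalate, List.intersperse]

lemma pvDropF (rows : List (List Char)) (hne : rows ≠ []) :
    ((rows.map (fun r => r ++ ['\n'])).flatten).dropLast = List.intercalate ['\n'] rows := by
  induction rows with
  | nil => exact absurd rfl hne
  | cons r t ih =>
    cases t with
    | nil => simp [List.intercalate]
    | cons r2 ts =>
      have hne2 : ((r2 :: ts).map (fun r => r ++ ['\n'])).flatten ≠ [] := by simp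
      rw [List.map_cons, List.flatten_cons, List.dropLast_append_of_ne_nil hne2,
        ih (by simp), pvIntercalate_cons₂]

lemma pvFinal (rows : List (List Char)) (hne : rows ≠ []) :
    (['\n'] ++ (rows.map (fun r => r ++ ['\n'])).flatten).dropLast
      = ['\n'] ++ List.intercalate ['\n'] rows := by
  have hf : (rows.map (fun r => r ++ ['\n'])).flatten ≠ [] := by
    cases rows with
    | nil => exact absurd rfl hne
    | cons r t => simp
  rw [List.dropLast_append_of_ne_nil hf, pvDropF rows hne]

lemma pvFinal' (ys : List Int) (R : Int → List Char) (hne : ys ≠ []) :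
    (['\n'] ++ (ys.map (fun y => R y ++ ['\n'])).flatten).dropLast
      = ['\n'] ++ List.intercalate ['\n'] (ys.map R) := by
  have := pvFinal (ys.map R) (by simpa using hne)
  simpa [List.map_map, Function.comp_def] using this

lemma pvA_toList (panels : List (Int × Int × Int)) (maxy miny minx maxx : Int)
    (h1 : PySem.List.max? (panels.map (fun e => e.2.1)) (fun v => v) = some maxy)
    (h2 : PySem.List.min? (panels.map (fun e => e.2.1)) (fun v => v) = some miny)
    (h3 : PySem.List.min? (panels.map (fun e => e.1)) (fun v => v) = some minx)
    (h4 : PySem.List.max? (panels.map (fun e => e.1)) (fun v => v) = some maxx) :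
    (get_repr_panels panels).toList =
      (['\n'] ++ ((PySem.List.pyRange maxy (miny - 1) (-1)).map (fun y =>
          ((PySem.List.pyRange minx (maxx + 1) 1).map (fun x => pvTok (pvCell panels x y))).flatten ++ ['\n'])).flatten).dropLast := by
  have key := pvFoldlRows (PySem.List.pyRange maxy (miny - 1) (-1)) (PySem.List.pyRange minx (maxx + 1) 1)
      (fun x y => pvToken (pvCell panels x y)) "\n"
  simp only [pvToken_toList] at key
  have hnl : ("\n" : String).toList = ['\n'] := rfl
  rw [hnl] at key
  unfold get_repr_panels
  simp only [h1, h2, h3, h4]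
  rw [PySem.Str.slice_to_neg_one]
  exact congrArg List.dropLast key

-- lit dict lookup = the x's of the lit entries of row y, in list order
lemma pvLit_getD (panels : List (Int × Int × Int)) (y : Int) :
    (pvLit panels).getD y [] = pvLitList panels y := by
  unfold pvLit pvLitList
  rw [← List.foldl_filter]
  have hmap : (panels.filter (fun e => e.2.2 == 1)).foldl
      (fun d e => d.modify e.2.1 [] (fun l => l ++ [e.1])) PySem.Dict.empty
      = ((panels.filter (fun e => e.2.2 == 1)).map (fun e => (e.2.1, e.1))).foldl
        (fun d p => d.modify p.1 [] (fun l => l ++ [p.2])) PySem.Dict.empty := by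
    rw [List.foldl_map]
  rw [hmap, PySem.Dict.getD_foldl_modify_append, PySem.Dict.getD_empty]
  rw [List.filter_map, List.map_map]
  simp [Function.comp_def]

lemma pvMem_litList (panels : List (Int × Int × Int)) (y x : Int) :
    x ∈ pvLitList panels y ↔ (x, y, 1) ∈ panels := by
  unfold pvLitList
  simp only [List.mem_map, List.mem_filter, beq_iff_eq]
  constructor
  · rintro ⟨e, ⟨⟨he, h1⟩, hy⟩, hx⟩
    obtain ⟨a, b, c⟩ := e
    simp_all
  · intro h
    exact ⟨(x, y, 1), ⟨⟨h, rfl⟩, rfl⟩, rfl⟩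

lemma pvNodup_litList (panels : List (Int × Int × Int))
    (hnd : (panels.map (fun e => (e.1, e.2.1))).Nodup) (y : Int) :
    (pvLitList panels y).Nodup := by
  unfold pvLitList
  set fl := (panels.filter (fun e => e.2.2 == 1)).filter (fun e => e.2.1 == y) with hfl
  have hsub : fl.Sublist panels := List.filter_sublist.trans List.filter_sublist
  have hnd' : (fl.map (fun e => (e.1, e.2.1))).Nodup := (hsub.map _).nodup hnd
  have hy : ∀ e ∈ fl, e.2.1 = y := by
    intro e he
    have := (List.mem_filter.mp he).2
    simpa using this
  apply List.Nodup.map_on _ (hnd'.of_map _)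
  intro a ha b hb hab
  have : (a.1, a.2.1) = (b.1, b.2.1) := by rw [hab, hy a ha, hy b hb]
  exact List.inj_on_of_nodup_map hnd' ha hb this

-- find?-characterisation of the dict lookup under unique keys
lemma pvCell_eq_one_iff (panels : List (Int × Int × Int))
    (hnd : (panels.map (fun e => (e.1, e.2.1))).Nodup) (x y : Int) :
    pvCell panels x y = 1 ↔ (x, y, 1) ∈ panels := by
  unfold pvCell
  constructor
  · intro h
    cases hf : panels.find? (fun e => e.1 == x && e.2.1 == y) with
    | none => rw [hf] at h; exact absurd h (by norm_num)
    | some e =>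
      rw [hf] at h
      have hm := List.mem_of_find?_eq_some hf
      have hp := List.find?_some hf
      simp only [Bool.and_eq_true, beq_iff_eq] at hp
      obtain ⟨a, b, c⟩ := e
      simp_all
  · intro hm
    cases hf : panels.find? (fun e => e.1 == x && e.2.1 == y) with
    | none =>
      exfalso
      have := List.find?_eq_none.mp hf (x, y, 1) hm
      simp at this
    | some e =>
      have hme := List.mem_of_find?_eq_some hf
      have hp := List.find?_some hf
      simp only [Bool.and_eq_true, beq_iff_eq] at hp
      have : e = (x, y, 1) := by
        apply List.inj_on_of_nodup_map hnd hme hm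
        simp [hp.1, hp.2]
      rw [this]

lemma pvRepeat_flatten (n : Int) :
    PySem.List.pyRepeat ([' ', ' '] : List Char) n = (List.replicate n.toNat [' ', ' ']).flatten := rfl

-- a run of blanks: the constant map over a unit range is '  ' * n
lemma pvBlankRun (lo m : Int) :
    ((PySem.List.pyRange lo m 1).map (fun _ => ([' ', ' '] : List Char))).flatten
      = PySem.List.pyRepeat [' ', ' '] (m - lo) := by
  rw [PySem.List.pyRange_one, List.map_map]
  simp only [Function.comp_def, List.map_const', List.length_range]
  rfl

-- the sparse fill over a strictly increasing list of lit x's equals the cell-by-cell row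
lemma pvSparse (S : List Int) (hi : Int) :
    ∀ (lo : Int) (acc : List Char), S.Pairwise (· < ·) → (∀ x ∈ S, lo ≤ x ∧ x < hi) →
    (S.foldl (fun (p : List Char × Int) x =>
        (p.1 ++ PySem.List.pyRepeat [' ', ' '] (x - p.2) ++ ['#', '#'], x + 1)) (acc, lo)).1
      ++ PySem.List.pyRepeat [' ', ' ']
          (hi - (S.foldl (fun (p : List Char × Int) x =>
            (p.1 ++ PySem.List.pyRepeat [' ', ' '] (x - p.2) ++ ['#', '#'], x + 1)) (acc, lo)).2)
      = acc ++ ((PySem.List.pyRange lo hi 1).map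
          (fun x => if x ∈ S then (['#', '#'] : List Char) else [' ', ' '])).flatten := by
  induction S with
  | nil =>
    intro lo acc _ _
    simp only [List.foldl_nil]
    rw [show (PySem.List.pyRange lo hi 1).map (fun x => if x ∈ ([] : List Int) then (['#', '#'] : List Char) else [' ', ' '])
        = (PySem.List.pyRange lo hi 1).map (fun _ => ([' ', ' '] : List Char)) from by simp,
      pvBlankRun]
  | cons a T ih =>
    intro lo acc hp hb
    obtain ⟨hla, hah⟩ := hb a (by simp)
    have hpT : T.Pairwise (· < ·) := hp.of_cons
    have haT : ∀ z ∈ T, a < z := fun z hz => List.rel_of_pairwise_cons hp hz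
    have hbT : ∀ x ∈ T, a + 1 ≤ x ∧ x < hi := by
      intro x hx
      exact ⟨by have := haT x hx; omega, (hb x (by simp [hx])).2⟩
    rw [List.foldl_cons, ih (a + 1) _ hpT hbT]
    rw [PySem.List.pyRange_one_append lo a hi hla (by omega),
      PySem.List.pyRange_one_cons hah]
    have hleft : ((PySem.List.pyRange lo a 1).map
        (fun x => if x ∈ a :: T then (['#', '#'] : List Char) else [' ', ' ']))
        = (PySem.List.pyRange lo a 1).map (fun _ => ([' ', ' '] : List Char)) := by
      apply List.map_congr_left
      intro z hz
      have hz' := PySem.List.mem_pyRange_one.mp hz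
      have hzn : z ∉ a :: T := by
        simp only [List.mem_cons, not_or]
        exact ⟨by omega, fun hzt => by have := haT z hzt; omega⟩
      simp [hzn]
    have hright : ((PySem.List.pyRange (a + 1) hi 1).map
        (fun x => if x ∈ a :: T then (['#', '#'] : List Char) else [' ', ' ']))
        = (PySem.List.pyRange (a + 1) hi 1).map
            (fun x => if x ∈ T then (['#', '#'] : List Char) else [' ', ' ']) := by
      apply List.map_congr_left
      intro z hz
      have hz' := PySem.List.mem_pyRange_one.mp hz
      have hza : z ≠ a := by omega
      simp [hza]
    rw [List.map_append, List.map_cons, hleft, hright]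
    simp [List.flatten_append, pvRepeat_flatten, List.append_assoc]

lemma pvPairwise_lt_of_le_nodup (l : List Int)
    (h1 : l.Pairwise (· ≤ ·)) (h2 : l.Nodup) : l.Pairwise (· < ·) := by
  have := h1.and h2
  exact this.imp (fun h => lt_of_le_of_ne h.1 h.2)

-- per-row equality: B's sparse row = A's cell-by-cell row
lemma pvRow_eq (panels : List (Int × Int × Int)) (minx maxx y : Int)
    (hnd : (panels.map (fun e => (e.1, e.2.1))).Nodup)
    (hbx : ∀ x ∈ pvLitList panels y, minx ≤ x ∧ x < maxx + 1) :
    pvRowChars minx maxx (PySem.List.sorted ((pvLit panels).getD y []) (fun v => v))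
      = ((PySem.List.pyRange minx (maxx + 1) 1).map (fun x => pvTok (pvCell panels x y))).flatten := by
  set S := PySem.List.sorted ((pvLit panels).getD y []) (fun v => v) with hS
  have hmemS : ∀ x, x ∈ S ↔ x ∈ pvLitList panels y := by
    intro x
    rw [hS, PySem.List.mem_sorted, pvLit_getD]
  have hpS : S.Pairwise (· < ·) := by
    apply pvPairwise_lt_of_le_nodup
    · exact PySem.List.sorted_pairwise _ _
    · exact (PySem.List.sorted_perm _ _ _).nodup_iff.mpr
        (by rw [pvLit_getD]; exact pvNodup_litList panels hnd y)
  have hbS : ∀ x ∈ S, minx ≤ x ∧ x < maxx + 1 := fun x hx => hbx x ((hmemS x).mp hx)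
  unfold pvRowChars
  rw [pvSparse S (maxx + 1) minx [] hpS hbS]
  rw [List.nil_append]
  apply congrArg List.flatten
  apply List.map_congr_left
  intro x _
  by_cases hx : pvCell panels x y = 1
  · have : x ∈ S := (hmemS x).mpr ((pvMem_litList panels y x).mpr
      ((pvCell_eq_one_iff panels hnd x y).mp hx))
    simp [this, pvTok, hx]
  · have : x ∉ S := fun hc => hx ((pvCell_eq_one_iff panels hnd x y).mpr
      ((pvMem_litList panels y x).mp ((hmemS x).mp hc)))
    have hx' : (pvCell panels x y == 1) = false := by simpa using hx
    simp [this, pvTok, hx']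

lemma pvB_toList (panels : List (Int × Int × Int)) (minx maxx miny maxy : Int)
    (h3 : PySem.List.min? (panels.map (fun e => e.1)) (fun v => v) = some minx)
    (h4 : PySem.List.max? (panels.map (fun e => e.1)) (fun v => v) = some maxx)
    (h2 : PySem.List.min? (panels.map (fun e => e.2.1)) (fun v => v) = some miny)
    (h1 : PySem.List.max? (panels.map (fun e => e.2.1)) (fun v => v) = some maxy) :
    (get_repr_panels_alt panels).toList =
      ['\n'] ++ List.intercalate ['\n']
        ((PySem.List.pyRange maxy (miny - 1) (-1)).map (fun y =>
          pvRowChars minx maxx (PySem.List.sorted ((pvLit panels).getD y []) (fun v => v)))) := by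
  unfold get_repr_panels_alt
  simp only [h1, h2, h3, h4]
  rw [String.toList_append, PySem.Str.toList_join]
  have hnl : ("\n" : String).toList = ['\n'] := rfl
  rw [hnl]
  simp [PySem.Chars.join, List.map_map, Function.comp_def]

theorem pvMain (panels : List (Int × Int × Int))
    (hne : panels ≠ []) (hnd : (panels.map (fun e => (e.1, e.2.1))).Nodup) :
    get_repr_panels panels = get_repr_panels_alt panels := by
  have hys : panels.map (fun e => e.2.1) ≠ [] := fun hcon => hne (List.map_eq_nil_iff.mp hcon)
  have hxs : panels.map (fun e => e.1) ≠ [] := fun hcon => hne (List.map_eq_nil_iff.mp hcon)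
  cases hmy : PySem.List.max? (panels.map (fun e => e.2.1)) (fun v => v) with
  | none => exact absurd ((PySem.List.max?_eq_none_iff _ _).mp hmy) hys
  | some maxy =>
  cases hmy2 : PySem.List.min? (panels.map (fun e => e.2.1)) (fun v => v) with
  | none => exact absurd ((PySem.List.min?_eq_none_iff _ _).mp hmy2) hys
  | some miny =>
  cases hmx1 : PySem.List.min? (panels.map (fun e => e.1)) (fun v => v) with
  | none => exact absurd ((PySem.List.min?_eq_none_iff _ _).mp hmx1) hxs
  | some minx =>
  cases hmx2 : PySem.List.max? (panels.map (fun e => e.1)) (fun v => v) with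
  | none => exact absurd ((PySem.List.max?_eq_none_iff _ _).mp hmx2) hxs
  | some maxx =>
  have hyy : miny ≤ maxy := PySem.List.max?_isMax hmy miny (PySem.List.min?_mem hmy2)
  have hbx : ∀ y x, x ∈ pvLitList panels y → minx ≤ x ∧ x < maxx + 1 := by
    intro y x hx
    have hm := (pvMem_litList panels y x).mp hx
    have hmx : x ∈ panels.map (fun e => e.1) := by
      rw [List.mem_map]; exact ⟨(x, y, 1), hm, rfl⟩
    have h1 := PySem.List.min?_isMin hmx1 x hmx
    have h2 := PySem.List.max?_isMax hmx2 x hmx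
    exact ⟨h1, by omega⟩
  apply String.toList_inj.mp
  rw [pvA_toList panels maxy miny minx maxx hmy hmy2 hmx1 hmx2,
      pvB_toList panels minx maxx miny maxy hmx1 hmx2 hmy2 hmy]
  have hyrne : PySem.List.pyRange maxy (miny - 1) (-1) ≠ [] := by
    rw [PySem.List.pyRange_neg_one]
    simp only [ne_eq, List.map_eq_nil_iff, List.range_eq_nil]
    omega
  rw [pvFinal' _ (fun y => ((PySem.List.pyRange minx (maxx + 1) 1).map (fun x => pvTok (pvCell panels x y))).flatten) hyrne]
  refine congrArg (fun l => ['\n'] ++ List.intercalate ['\n'] l) ?_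
  apply List.map_congr_left
  intro y _
  exact (pvRow_eq panels minx maxx y hnd (hbx y)).symm

-- ===== VERDICT (by name: the statement is the Claim_ definition above) =====
theorem get_repr_panels_spec : Claim_equal_get_repr_panels := by
  intro panels _ hpre
  unfold Spec_get_repr_panels
  exact pvMain panels hpre.1 hpre.2
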